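-- pv_equiv track=rewrite | github.com/haruhi-medical/robby-the-match | scripts/ai_content_engine.py | _analyze_calendar_mix
-- ===== SOURCE A (Python) =====
-- from typing import Any, Dict, List, Optional, Tuple
--
-- CALENDAR_MIX_RATIOS = {
--     "あるある": 0.35,
--     "給与": 0.20,
--     "業界裏側": 0.15,
--     "地域ネタ": 0.15,
--     "転職": 0.10,
--     "トレンド": 0.05,
-- }
--
-- CALENDAR_CATEGORY_TO_CONTENT_TYPE = {
--     "あるある": "aruaru",
--     "給与": "salary",
--     "業界裏側": "industry",
--     "地域ネタ": "local",
--     "転職": "career",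
--     "トレンド": "trend",
-- }
--
-- def _analyze_calendar_mix(queue: dict) -> Dict[str, int]:
--     """Analyze content type distribution using CALENDAR_MIX_RATIOS categories."""
--     dist: Dict[str, int] = {cat: 0 for cat in CALENDAR_MIX_RATIOS}
--     for p in queue.get("posts", []):
--         if p.get("status") in ("pending", "ready"):
--             ct = p.get("content_type", "")
--             for cat, ctype in CALENDAR_CATEGORY_TO_CONTENT_TYPE.items():
--                 if ctype == ct:
--                     dist[cat] += 1
--                     break
--             else:
--                 # Map regional, local etc. to closest category
--                 if ct in ("regional", "local"):
--                     dist["あるある"] = dist.get("あるある", 0) + 1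
--     return dist
-- ===== SOURCE B (Python) =====
-- from typing import Dict
--
-- CALENDAR_MIX_RATIOS = {
--     "あるある": 0.35,
--     "給与": 0.20,
--     "業界裏側": 0.15,
--     "地域ネタ": 0.15,
--     "転職": 0.10,
--     "トレンド": 0.05,
-- }
--
-- CALENDAR_CATEGORY_TO_CONTENT_TYPE = {
--     "あるある": "aruaru",
--     "給与": "salary",
--     "業界裏側": "industry",
--     "地域ネタ": "local",
--     "転職": "career",
--     "トレンド": "trend",
-- }
--
-- def _analyze_calendar_mix(queue: dict) -> Dict[str, int]:
--     """Tally content types once, then translate the table through the category map."""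
--     counts: Dict[str, int] = {}
--     for p in queue.get("posts", []):
--         if p.get("status") in ("pending", "ready"):
--             ct = p.get("content_type", "")
--             counts[ct] = counts.get(ct, 0) + 1
--     dist = {cat: 0 for cat in CALENDAR_MIX_RATIOS}
--     for cat, ctype in CALENDAR_CATEGORY_TO_CONTENT_TYPE.items():
--         dist[cat] = counts.get(ctype, 0)
--     # only 'regional' misses the map ('local' already matches 地域ネタ); it falls back to あるある
--     dist["あるある"] += counts.get("regional", 0)
--     return dist
-- ===== Notes on version B (the rewrite author's own statement) =====
-- stated objective: idiomatic
-- what changed: B replaces A's per-post inner scan over the category mapping (with a for/else fallback) by a single counting pass building a content-type tally, then translates the tally through the mapping table and adds the 'regional' fallback once.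
import Mathlib
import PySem

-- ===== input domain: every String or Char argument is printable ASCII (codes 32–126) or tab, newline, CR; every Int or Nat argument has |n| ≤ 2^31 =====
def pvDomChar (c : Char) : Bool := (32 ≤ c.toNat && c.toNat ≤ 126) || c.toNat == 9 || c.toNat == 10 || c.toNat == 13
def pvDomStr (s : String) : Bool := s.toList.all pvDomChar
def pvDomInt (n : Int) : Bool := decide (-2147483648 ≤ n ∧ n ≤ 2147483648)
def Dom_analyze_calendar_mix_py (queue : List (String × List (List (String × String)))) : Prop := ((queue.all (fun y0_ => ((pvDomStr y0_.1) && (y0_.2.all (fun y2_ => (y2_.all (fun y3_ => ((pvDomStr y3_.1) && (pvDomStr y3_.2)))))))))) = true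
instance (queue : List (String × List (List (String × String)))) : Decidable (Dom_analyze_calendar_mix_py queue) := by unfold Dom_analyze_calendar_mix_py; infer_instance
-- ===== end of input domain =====

-- B replaces A's per-post inner scan over the category mapping by one counting pass plus a table translation (idiomatic; same results).

-- ===== PORT A =====
-- p.get("status") in ("pending", "ready")
def pvOk (p : List (String × String)) : Bool :=
  let st := (PySem.Dict.mk p).get? "status"
  st == some "pending" || st == some "ready"

-- ct = p.get("content_type", "")
def pvCt (p : List (String × String)) : String :=
  (PySem.Dict.mk p).getD "content_type" ""

-- CALENDAR_CATEGORY_TO_CONTENT_TYPE, in insertion order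
def pvMapping : List (String × String) :=
  [("あるある", "aruaru"), ("給与", "salary"), ("業界裏側", "industry"),
   ("地域ネタ", "local"), ("転職", "career"), ("トレンド", "trend")]

-- dist initialised to {cat: 0 for cat in CALENDAR_MIX_RATIOS}
def pvDistInit : PySem.Dict String Int :=
  PySem.Dict.mk [("あるある", 0), ("給与", 0), ("業界裏側", 0),
                 ("地域ネタ", 0), ("転職", 0), ("トレンド", 0)]

-- the inner 'for cat, ctype in …: if ctype == ct: …; break / else: …' — first matching category
def pvFindCat : List (String × String) → String → Option String
  | [], _ => none
  | (cat, ctype) :: rest, ct => if ctype == ct then some cat else pvFindCat rest ct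

-- one iteration of A's loop over posts (dist[cat] += 1: cat is always a key of dist)
def pvStepA (dist : PySem.Dict String Int) (p : List (String × String)) : PySem.Dict String Int :=
  if pvOk p then
    let ct := pvCt p
    match pvFindCat pvMapping ct with
    | some cat => dist.insert cat (dist.getD cat 0 + 1)
    | none =>
        if ct == "regional" || ct == "local" then
          dist.insert "あるある" (dist.getD "あるある" 0 + 1)
        else dist
  else dist

def analyze_calendar_mix_py (queue : List (String × List (List (String × String)))) : List (String × Int) :=
  let posts := (PySem.Dict.mk queue).getD "posts" []
  (posts.foldl pvStepA pvDistInit).items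

-- ===== PORT B =====
-- one iteration of B's counting pass: counts[ct] = counts.get(ct, 0) + 1 for pending/ready posts
def pvStepB (counts : PySem.Dict String Int) (p : List (String × String)) : PySem.Dict String Int :=
  if pvOk p then
    let ct := pvCt p
    counts.insert ct (counts.getD ct 0 + 1)
  else counts

def analyze_calendar_mix_py_alt (queue : List (String × List (List (String × String)))) : List (String × Int) :=
  let posts := (PySem.Dict.mk queue).getD "posts" []
  let counts := posts.foldl pvStepB PySem.Dict.empty
  let dist := pvMapping.foldl (fun d pr => d.insert pr.1 (counts.getD pr.2 0)) pvDistInit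
  (dist.insert "あるある" (dist.getD "あるある" 0 + counts.getD "regional" 0)).items

-- ===== PRECONDITION & SPEC =====
def Spec_analyze_calendar_mix_py (queue : List (String × List (List (String × String)))) (out : List (String × Int)) : Prop := out = analyze_calendar_mix_py_alt queue
instance (queue : List (String × List (List (String × String)))) (out : List (String × Int)) : Decidable (Spec_analyze_calendar_mix_py queue out) := by unfold Spec_analyze_calendar_mix_py; infer_instance

-- ===== CLAIM (what is proved, stated in full; the proofs are below) =====
def Claim_equal_analyze_calendar_mix_py : Prop := ∀ (queue : List (String × List (List (String × String)))), Dom_analyze_calendar_mix_py queue → Spec_analyze_calendar_mix_py queue (analyze_calendar_mix_py queue)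

-- ===== LEMMAS AND PROOFS =====

-- number of pending/ready posts with content type k
def pvCnt (posts : List (List (String × String))) (k : String) : Int :=
  ((posts.filter pvOk).map pvCt).count k

theorem pvCnt_nil (k : String) : pvCnt [] k = 0 := rfl

theorem pvCnt_cons (p : List (String × String)) (ps : List (List (String × String))) (k : String) :
    pvCnt (p :: ps) k =
      (if pvOk p then (if pvCt p = k then 1 else 0) else 0) + pvCnt ps k := by
  unfold pvCnt
  by_cases h : pvOk p
  · simp [h, List.count_cons]
    by_cases hk : pvCt p = k
    · simp [hk]; omega
    · simp [hk]
  · simp [h]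

-- A's loop, run from an arbitrary literal-shape dist, adds the counts per category
theorem stepA_invariant (posts : List (List (String × String)))
    (a b c d e f : Int) :
    posts.foldl pvStepA
      (PySem.Dict.mk [("あるある", a), ("給与", b), ("業界裏側", c),
                      ("地域ネタ", d), ("転職", e), ("トレンド", f)]) =
    PySem.Dict.mk
      [("あるある", a + pvCnt posts "aruaru" + pvCnt posts "regional"),
       ("給与", b + pvCnt posts "salary"),
       ("業界裏側", c + pvCnt posts "industry"),
       ("地域ネタ", d + pvCnt posts "local"),
       ("転職", e + pvCnt posts "career"),
       ("トレンド", f + pvCnt posts "trend")] := by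
  induction posts generalizing a b c d e f with
  | nil => simp [pvCnt_nil]
  | cons p ps ih =>
    rw [List.foldl_cons]
    by_cases hok : pvOk p
    · have hstep : pvStepA
          (PySem.Dict.mk [("あるある", a), ("給与", b), ("業界裏側", c),
                          ("地域ネタ", d), ("転職", e), ("トレンド", f)]) p =
          (if pvCt p = "aruaru" ∨ pvCt p = "regional" then
            PySem.Dict.mk [("あるある", a + 1), ("給与", b), ("業界裏側", c),
                           ("地域ネタ", d), ("転職", e), ("トレンド", f)]
          else if pvCt p = "salary" then
            PySem.Dict.mk [("あるある", a), ("給与", b + 1), ("業界裏側", c),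
                           ("地域ネタ", d), ("転職", e), ("トレンド", f)]
          else if pvCt p = "industry" then
            PySem.Dict.mk [("あるある", a), ("給与", b), ("業界裏側", c + 1),
                           ("地域ネタ", d), ("転職", e), ("トレンド", f)]
          else if pvCt p = "local" then
            PySem.Dict.mk [("あるある", a), ("給与", b), ("業界裏側", c),
                           ("地域ネタ", d + 1), ("転職", e), ("トレンド", f)]
          else if pvCt p = "career" then
            PySem.Dict.mk [("あるある", a), ("給与", b), ("業界裏側", c),
                           ("地域ネタ", d), ("転職", e + 1), ("トレンド", f)]
          else if pvCt p = "trend" then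
            PySem.Dict.mk [("あるある", a), ("給与", b), ("業界裏側", c),
                           ("地域ネタ", d), ("転職", e), ("トレンド", f + 1)]
          else
            PySem.Dict.mk [("あるある", a), ("給与", b), ("業界裏側", c),
                           ("地域ネタ", d), ("転職", e), ("トレンド", f)]) := by
        unfold pvStepA
        rw [hok]
        simp only [if_true]
        by_cases h1 : pvCt p = "aruaru"
        · simp [h1, pvFindCat, pvMapping, PySem.Dict.insert, PySem.Dict.getD, PySem.Dict.get?, PySem.Dict.contains]
        by_cases h2 : pvCt p = "salary"
        · simp [h2, pvFindCat, pvMapping, PySem.Dict.insert, PySem.Dict.getD, PySem.Dict.get?, PySem.Dict.contains]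
        by_cases h3 : pvCt p = "industry"
        · simp [h3, pvFindCat, pvMapping, PySem.Dict.insert, PySem.Dict.getD, PySem.Dict.get?, PySem.Dict.contains]
        by_cases h4 : pvCt p = "local"
        · simp [h4, pvFindCat, pvMapping, PySem.Dict.insert, PySem.Dict.getD, PySem.Dict.get?, PySem.Dict.contains]
        by_cases h5 : pvCt p = "career"
        · simp [h5, pvFindCat, pvMapping, PySem.Dict.insert, PySem.Dict.getD, PySem.Dict.get?, PySem.Dict.contains]
        by_cases h6 : pvCt p = "trend"
        · simp [h6, pvFindCat, pvMapping, PySem.Dict.insert, PySem.Dict.getD, PySem.Dict.get?, PySem.Dict.contains]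
        by_cases h7 : pvCt p = "regional"
        · simp [h7, pvFindCat, pvMapping, PySem.Dict.insert, PySem.Dict.getD, PySem.Dict.get?, PySem.Dict.contains]
        · simp [h1, h2, h3, h4, h5, h6, h7, Ne.symm h1, Ne.symm h2, Ne.symm h3, Ne.symm h4, Ne.symm h5, Ne.symm h6, pvFindCat, pvMapping]
      rw [hstep]
      by_cases h1 : pvCt p = "aruaru" ∨ pvCt p = "regional"
      all_goals simp only [h1, if_pos, ite_false]
      · rcases h1 with h1 | h1 <;>
          · simp [ih, pvCnt_cons, hok, h1]
            ring_nf
      · rw [not_or] at h1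
        by_cases h2 : pvCt p = "salary"
        · simp [ih, pvCnt_cons, hok, h2]; ring
        by_cases h3 : pvCt p = "industry"
        · simp [ih, pvCnt_cons, hok, h3]; ring
        by_cases h4 : pvCt p = "local"
        · simp [ih, pvCnt_cons, hok, h4]; ring
        by_cases h5 : pvCt p = "career"
        · simp [ih, pvCnt_cons, hok, h5]; ring
        by_cases h6 : pvCt p = "trend"
        · simp [ih, pvCnt_cons, hok, h6]; ring
        · simp [h2, h3, h4, h5, h6, h1.1, h1.2, ih, pvCnt_cons, hok]
    · have hstep : pvStepA
          (PySem.Dict.mk [("あるある", a), ("給与", b), ("業界裏側", c),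
                          ("地域ネタ", d), ("転職", e), ("トレンド", f)]) p =
          PySem.Dict.mk [("あるある", a), ("給与", b), ("業界裏側", c),
                         ("地域ネタ", d), ("転職", e), ("トレンド", f)] := by
        unfold pvStepA
        simp [hok]
      rw [hstep, ih]
      simp [pvCnt_cons, hok]

-- B's counting pass computes pvCnt at every key
theorem stepB_invariant (posts : List (List (String × String)))
    (counts : PySem.Dict String Int) (k : String) :
    (posts.foldl pvStepB counts).getD k 0 = counts.getD k 0 + pvCnt posts k := by
  induction posts generalizing counts with
  | nil => simp [pvCnt_nil]
  | cons p ps ih =>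
    rw [List.foldl_cons, ih, pvCnt_cons]
    unfold pvStepB
    by_cases hok : pvOk p
    · rw [hok]
      simp only [if_true]
      rw [PySem.Dict.getD_insert]
      by_cases hk : k = pvCt p
      · simp [hk]; ring
      · have : ¬ pvCt p = k := fun h => hk h.symm
        simp [hk, this]
    · simp [hok]

-- ===== VERDICT (by name: the statement is the Claim_ definition above) =====
theorem analyze_calendar_mix_py_spec : Claim_equal_analyze_calendar_mix_py := by
  intro queue _
  unfold Spec_analyze_calendar_mix_py
  simp only [analyze_calendar_mix_py, analyze_calendar_mix_py_alt, pvDistInit, pvMapping,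
             List.foldl_cons, List.foldl_nil]
  rw [stepA_invariant]
  have hc : ∀ k, ((((PySem.Dict.mk queue).getD "posts" []).foldl pvStepB PySem.Dict.empty).getD k 0)
      = pvCnt ((PySem.Dict.mk queue).getD "posts" []) k := by
    intro k; rw [stepB_invariant]; simp
  simp only [PySem.Dict.getD, PySem.Dict.get?] at hc
  simp [PySem.Dict.insert, PySem.Dict.getD, PySem.Dict.get?, PySem.Dict.contains, hc]
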